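-- pv_equiv track=rewrite | github.com/Shawvin/Leetcode | 1700-Easy.py | countStudents2
-- ===== SOURCE A (Python) =====
-- def countStudents2(students, sandwiches):
--     s_dict={}
--     for i in students:
--         s_dict[i]=s_dict.get(i,0)+1
--     remain=len(sandwiches)
--     for i in sandwiches:
--         if s_dict.get(i,0)==0:
--             break
--         s_dict[i]-=1
--         remain-=1
--     return remain
-- ===== SOURCE B (Python) =====
-- def countStudents2(students, sandwiches):
--     # Stateless closed-form: the serving process stops at the first position j
--     # where the demand for sandwiches[j] among the first j+1 sandwiches exceeds
--     # the supply among the students; everything before that is served.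
--     served = len(sandwiches)
--     for j, s in enumerate(sandwiches):
--         if sandwiches[:j+1].count(s) > students.count(s):
--             served = j
--             break
--     return len(sandwiches) - served
-- ===== Notes on version B (the rewrite author's own statement) =====
-- stated objective: alternative
-- what changed: Replaces A's stateful simulation (a count dict built in one pass and destructively decremented per sandwich until a count hits zero) by a stateless closed-form characterisation: the first index j at which the prefix demand sandwiches[:j+1].count(s) exceeds the total supply students.count(s) is where serving stops, so the answer is len(sandwiches) minus that index.
import Mathlib
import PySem

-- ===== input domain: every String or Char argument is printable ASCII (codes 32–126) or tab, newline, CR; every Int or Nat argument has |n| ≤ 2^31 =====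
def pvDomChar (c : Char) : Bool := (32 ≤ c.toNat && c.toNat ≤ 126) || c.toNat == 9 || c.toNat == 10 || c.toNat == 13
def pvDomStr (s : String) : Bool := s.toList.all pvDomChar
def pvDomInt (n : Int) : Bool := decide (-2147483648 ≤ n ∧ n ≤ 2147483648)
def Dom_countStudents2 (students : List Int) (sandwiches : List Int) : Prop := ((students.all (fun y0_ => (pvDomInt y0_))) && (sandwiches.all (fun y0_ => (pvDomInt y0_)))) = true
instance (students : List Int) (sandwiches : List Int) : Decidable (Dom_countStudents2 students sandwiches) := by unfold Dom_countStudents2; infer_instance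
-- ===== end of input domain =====

-- B replaces A's stateful decrementing count-dict by a stateless closed-form test on
-- prefix counts (alternative decomposition; not faster). Return values only.

-- ===== PORT A =====
-- the second loop of A, with `break` as early return
def countA_loop : PySem.Dict Int Int → Int → List Int → Int
  | _, remain, [] => remain
  | d, remain, i :: rest =>
    if d.getD i 0 == 0 then remain
    else countA_loop (d.insert i (d.getD i 0 - 1)) (remain - 1) rest

def countStudents2 (students : List Int) (sandwiches : List Int) : Int :=
  let s_dict := students.foldl (fun d i => d.insert i (d.getD i 0 + 1)) PySem.Dict.empty
  countA_loop s_dict (sandwiches.length : Int) sandwiches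

-- ===== PORT B =====
-- B's loop: `for j, s in enumerate(sandwiches)` with early `break` returning j;
-- sandwiches[:j+1] is PySem.List.slice with upper bound j+1 (j ≥ 0, so exact)
def bFind (students sandwiches : List Int) : Nat → List Int → Option Nat
  | _, [] => none
  | j, s :: rest =>
    if (PySem.List.slice sandwiches none (some ((j : Int) + 1))).count s > students.count s
    then some j
    else bFind students sandwiches (j + 1) rest

def countStudents2_alt (students : List Int) (sandwiches : List Int) : Int :=
  let served : Int :=
    match bFind students sandwiches 0 sandwiches with
    | some j => (j : Int)
    | none => (sandwiches.length : Int)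
  (sandwiches.length : Int) - served

-- ===== PRECONDITION & SPEC =====
def Spec_countStudents2 (students : List Int) (sandwiches : List Int) (out : Int) : Prop := out = countStudents2_alt students sandwiches
instance (students : List Int) (sandwiches : List Int) (out : Int) : Decidable (Spec_countStudents2 students sandwiches out) := by unfold Spec_countStudents2; infer_instance

-- ===== CLAIM (what is proved, stated in full; the proofs are below) =====
def Claim_equal_countStudents2 : Prop := ∀ (students : List Int) (sandwiches : List Int), Dom_countStudents2 students sandwiches → Spec_countStudents2 students sandwiches (countStudents2 students sandwiches)

-- ===== LEMMAS AND PROOFS =====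

-- invariant: after serving the prefix `pre` (which is feasible), the dict entry for v
-- is students.count v - pre.count v; A's remaining loop agrees with B's prefix-count test
set_option maxHeartbeats 1000000 in
theorem loop_eq (students : List Int) :
    ∀ (suf pre : List Int) (d : PySem.Dict Int Int) (r : Int),
    (∀ v, d.getD v 0 = (students.count v : Int) - pre.count v) →
    (∀ v, pre.count v ≤ students.count v) →
    countA_loop d r suf =
      (match bFind students (pre ++ suf) pre.length suf with
       | some j => r - ((j : Int) - pre.length)
       | none => r - suf.length) := by
  intro suf
  induction suf with
  | nil => intro pre d r _ _; simp [countA_loop, bFind]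
  | cons s rest ih =>
    intro pre d r hinv hfeas
    have hslice : PySem.List.slice (pre ++ s :: rest) none (some ((pre.length : Int) + 1))
        = pre ++ [s] := by
      have h1 : ((pre.length : Int) + 1) = ((pre.length + 1 : Nat) : Int) := by push_cast; ring
      rw [h1, PySem.List.slice_to_natCast]
      simp [List.take_append]
    have hcount : (pre ++ [s]).count s = pre.count s + 1 := by
      simp [List.count_append]
    simp only [countA_loop, bFind, hslice, hcount, hinv s]
    by_cases hstop : pre.count s = students.count s
    · have hgt : pre.count s + 1 > students.count s := by omega
      have hz : ((students.count s : Int) - pre.count s == 0) = true := by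
        simp [hstop]
      rw [hz, if_pos rfl, if_pos hgt]
      push_cast; ring
    · have hlt : pre.count s < students.count s := lt_of_le_of_ne (hfeas s) hstop
      have hgt : ¬ (pre.count s + 1 > students.count s) := by omega
      have hz : ((students.count s : Int) - pre.count s == 0) = false := by
        have hne : (students.count s : Int) - pre.count s ≠ 0 := by omega
        simp [hne]
      rw [hz, if_neg (by simp), if_neg hgt]
      have hinv' : ∀ v, (d.insert s ((students.count s : Int) - (pre.count s : Int) - 1)).getD v 0
          = (students.count v : Int) - (pre ++ [s]).count v := by
        intro v
        rw [PySem.Dict.getD_insert]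
        by_cases hv : v = s
        · subst hv
          rw [if_pos rfl, hcount]
          push_cast; ring
        · have h0 : [s].count v = 0 := List.count_eq_zero.mpr (by simpa using hv)
          rw [if_neg hv, hinv v, List.count_append, h0]
          push_cast; ring
      have hfeas' : ∀ v, (pre ++ [s]).count v ≤ students.count v := by
        intro v
        by_cases hv : v = s
        · subst hv; rw [hcount]; omega
        · have h0 : [s].count v = 0 := List.count_eq_zero.mpr (by simpa using hv)
          rw [List.count_append, h0]
          simpa using hfeas v
      have happ : pre ++ s :: rest = (pre ++ [s]) ++ rest := by simp
      have hlen : pre.length + 1 = (pre ++ [s]).length := by simp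
      rw [happ, hlen,
        ih (pre ++ [s]) (d.insert s ((students.count s : Int) - (pre.count s : Int) - 1)) (r - 1) hinv' hfeas']
      cases bFind students ((pre ++ [s]) ++ rest) (pre ++ [s]).length rest with
      | some j => simp; ring
      | none => simp; ring

theorem countStudents2_spec : Claim_equal_countStudents2 := by
  intro students sandwiches _
  unfold Spec_countStudents2 countStudents2 countStudents2_alt
  have h := loop_eq students sandwiches []
    (students.foldl (fun d i => d.insert i (d.getD i 0 + 1)) PySem.Dict.empty)
    (sandwiches.length : Int)
    (by
      intro v
      rw [PySem.Dict.foldl_insert_getD_add_one_eq_counter, PySem.Dict.getD_counter]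
      simp)
    (by intro v; simp)
  simp only [List.nil_append, List.length_nil] at h
  rw [h]
  cases bFind students sandwiches 0 sandwiches with
  | some j => simp
  | none => simp
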